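-- pv_equiv track=rewrite | github.com/exact-coder/Competitive-Programming | CodeForces/8A.py | revmatch
-- ===== SOURCE A (Python) =====
-- def revmatch(text: str, pat1: str, pat2: str) -> bool:
--     m, n, o = len(pat1), len(text), len(pat2)
--     for i in range(n - 1, -1, -1):
--         for j in range(m):
--             if i - j < 0 or text[i - j] != pat1[j]:
--                 break
--             if j == m - 1:
--                 i -= m
--                 while i >= 0:
--                     for j in range(o):
--                         if i - j < 0 or text[i - j] != pat2[j]:
--                             break
--                         if j == o - 1:
--                             return True
--                     i -= 1
--     return False
-- ===== SOURCE B (Python) =====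
-- def revmatch(text: str, pat1: str, pat2: str) -> bool:
--     # empty patterns never match (A's match loops can never complete on them)
--     if not pat1 or not pat2:
--         return False
--     rp1, rp2 = pat1[::-1], pat2[::-1]
--     j = text.find(rp2)
--     if j == -1:
--         return False
--     return rp1 in text[j + len(rp2):]
-- ===== Notes on version B (the rewrite author's own statement) =====
-- stated objective: faster
-- what changed: A scans every text position backwards re-comparing both patterns by hand (and rescans the whole prefix for pat2 after every pat1 hit); B reverses the two patterns once and issues two library substring searches: find the earliest reversed-pat2 occurrence, then search reversed-pat1 in the remaining suffix.
import Mathlib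
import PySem

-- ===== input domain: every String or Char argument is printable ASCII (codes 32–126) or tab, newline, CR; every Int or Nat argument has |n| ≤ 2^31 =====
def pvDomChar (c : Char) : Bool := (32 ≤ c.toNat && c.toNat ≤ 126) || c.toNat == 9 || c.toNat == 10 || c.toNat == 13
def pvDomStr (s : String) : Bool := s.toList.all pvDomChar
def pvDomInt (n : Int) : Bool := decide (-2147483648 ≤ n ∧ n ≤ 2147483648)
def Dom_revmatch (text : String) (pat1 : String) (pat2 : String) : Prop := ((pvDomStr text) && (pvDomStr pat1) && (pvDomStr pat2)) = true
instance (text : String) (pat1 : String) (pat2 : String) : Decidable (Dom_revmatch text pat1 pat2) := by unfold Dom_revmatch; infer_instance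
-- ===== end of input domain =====

-- B replaces A's hand-rolled backwards pattern scans by two library substring searches
-- (find the earliest reversed-pat2 occurrence, then search reversed-pat1 in the rest); objective: faster.

-- ===== PORT A =====
-- A's inner "for j in range(len(p)): if i-j<0 or text[i-j]!=p[j]: break; if j==len(p)-1: <full match>"
-- (returns true iff the loop reaches j = len(p)-1 with every comparison succeeding)
def revChk (t p : List Char) (i : Int) (j : Nat) : Bool :=
  if h : j < p.length then
    if i - (j : Int) < 0 then false
    else if PySem.List.pyGet? t (i - (j : Int)) ≠ some p[j] then false
    else if j = p.length - 1 then true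
    else revChk t p i (j + 1)
  else false
termination_by p.length - j

-- A's "while i >= 0: <scan pat2 at i>; i -= 1"
def revWhile (t p2 : List Char) (i : Int) : Bool :=
  if h : 0 ≤ i then
    if revChk t p2 i 0 then true else revWhile t p2 (i - 1)
  else false
termination_by (i + 1).toNat
decreasing_by omega

-- A's outer "for i in range(n-1,-1,-1)" (the inner "i -= m" does not change the loop variable)
def revOuter (t p1 p2 : List Char) (i : Int) : Bool :=
  if h : 0 ≤ i then
    if revChk t p1 i 0 then
      if revWhile t p2 (i - (p1.length : Int)) then true else revOuter t p1 p2 (i - 1)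
    else revOuter t p1 p2 (i - 1)
  else false
termination_by (i + 1).toNat
decreasing_by all_goals omega

def revmatch (text : String) (pat1 : String) (pat2 : String) : Bool :=
  revOuter text.toList pat1.toList pat2.toList ((text.toList.length : Int) - 1)

-- ===== PORT B =====
def revmatch_alt (text : String) (pat1 : String) (pat2 : String) : Bool :=
  if pat1.toList.isEmpty || pat2.toList.isEmpty then false
  else
    -- pat1[::-1] (PySem.List.slice?_none_none_neg_one: s[::-1] is reverse)
    let rp1 := pat1.toList.reverse
    let rp2 := pat2.toList.reverse
    let j := PySem.Chars.find text.toList rp2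
    if j = -1 then false
    else PySem.Chars.isIn rp1 (PySem.List.slice text.toList (some (j + (rp2.length : Int))) none)

-- ===== PRECONDITION & SPEC =====
def Spec_revmatch (text : String) (pat1 : String) (pat2 : String) (out : Bool) : Prop := out = revmatch_alt text pat1 pat2
instance (text : String) (pat1 : String) (pat2 : String) (out : Bool) : Decidable (Spec_revmatch text pat1 pat2 out) := by unfold Spec_revmatch; infer_instance

-- ===== CLAIM (what is proved, stated in full; the proofs are below) =====
def Claim_equal_revmatch : Prop := ∀ (text : String) (pat1 : String) (pat2 : String), Dom_revmatch text pat1 pat2 → Spec_revmatch text pat1 pat2 (revmatch text pat1 pat2)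

-- ===== LEMMAS AND PROOFS =====

lemma revChk_iff (t p : List Char) (i : Int) (j : Nat) (hj : j < p.length) :
    revChk t p i j = true ↔
      ∀ j', j ≤ j' → ∀ (h : j' < p.length),
        0 ≤ i - (j' : Int) ∧ PySem.List.pyGet? t (i - (j' : Int)) = some p[j'] := by
  induction hn : p.length - j generalizing j with
  | zero => omega
  | succ n ih =>
    rw [revChk]
    rw [dif_pos hj]
    by_cases hneg : i - (j : Int) < 0
    · rw [if_pos hneg]
      simp only [Bool.false_eq_true, false_iff]
      intro hall
      exact absurd ((hall j le_rfl hj).1) (by omega)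
    · rw [if_neg hneg]
      by_cases hget : PySem.List.pyGet? t (i - (j : Int)) = some p[j]
      · rw [if_neg (not_not_intro hget)]
        by_cases hlast : j = p.length - 1
        · rw [if_pos hlast]
          simp only [true_iff]
          intro j' hj1 hj2
          have : j' = j := by omega
          subst this
          exact ⟨by omega, hget⟩
        · rw [if_neg hlast]
          rw [ih (j + 1) (by omega) (by omega)]
          constructor
          · intro hall j' hj1 hj2
            rcases Nat.eq_or_lt_of_le hj1 with h | h
            · subst h; exact ⟨by omega, hget⟩
            · exact hall j' (by omega) hj2
          · intro hall j' hj1 hj2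
            exact hall j' (by omega) hj2
      · rw [if_pos hget]
        simp only [Bool.false_eq_true, false_iff]
        intro hall
        exact absurd ((hall j le_rfl hj).2) hget
lemma revChk_zero_iff (t p : List Char) (i : Int) :
    revChk t p i 0 = true ↔
      0 < p.length ∧ ∃ q : Nat, (q : Int) + p.length = i + 1 ∧ q + p.length ≤ t.length ∧
        p.reverse <+: t.drop q := by
  by_cases hp : 0 < p.length
  · rw [revChk_iff t p i 0 hp]
    constructor
    · intro hall
      refine ⟨hp, ?_⟩
      have h0 := hall (p.length - 1) (by omega) (by omega)
      have hi : (p.length : Int) - 1 ≤ i := by omega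
      have hi0 : 0 ≤ i := by omega
      have hlen : i.toNat < t.length := by
        have h1 := (hall 0 (by omega) hp).2
        simp only [Nat.cast_zero, sub_zero] at h1
        rw [show i = ((i.toNat : Nat) : Int) by omega, PySem.List.pyGet?_natCast] at h1
        exact (List.getElem?_eq_some_iff.mp h1).1
      refine ⟨i.toNat + 1 - p.length, by omega, by omega, ?_⟩
      set q : Nat := i.toNat + 1 - p.length with hq
      rw [List.prefix_iff_eq_take]
      apply List.ext_getElem
      · simp; omega
      · intro r hr1 hr2
        have hrm : r < p.length := by simpa using hr1
        have h2 := (hall (p.length - 1 - r) (by omega) (by omega)).2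
        have harg : i - ((p.length - 1 - r : Nat) : Int) = ((q + r : Nat) : Int) := by
          push_cast; omega
        rw [harg, PySem.List.pyGet?_natCast] at h2
        rw [List.getElem?_eq_getElem (by omega : q + r < t.length)] at h2
        have h3 : t[q + r] = p[p.length - 1 - r] := by simpa using h2
        rw [List.getElem_take, List.getElem_drop, List.getElem_reverse]
        exact h3.symm
    · rintro ⟨-, q, hq, hqlen, hpre⟩
      intro j' hj0 hj'
      have harg : i - (j' : Int) = ((q + (p.length - 1 - j') : Nat) : Int) := by
        push_cast; omega
      refine ⟨by omega, ?_⟩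
      rw [harg, PySem.List.pyGet?_natCast]
      rw [List.getElem?_eq_getElem (by omega : q + (p.length - 1 - j') < t.length)]
      have hrm : p.length - 1 - j' < p.reverse.length := by simp; omega
      have h4 := List.IsPrefix.getElem hpre hrm
      rw [List.getElem_drop] at h4
      rw [List.getElem_reverse] at h4
      have e : p.length - 1 - (p.length - 1 - j') = j' := by omega
      simp only [e] at h4
      rw [← h4]
  · rw [revChk]
    simp only [dif_neg (by omega : ¬ 0 < p.length)]
    simp
    omega
lemma revWhile_iff (t p : List Char) (i : Int) :
    revWhile t p i = true ↔ ∃ i' : Int, 0 ≤ i' ∧ i' ≤ i ∧ revChk t p i' 0 = true := by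
  induction hn : (i + 1).toNat generalizing i with
  | zero =>
    rw [revWhile, dif_neg (by omega : ¬ 0 ≤ i)]
    simp only [Bool.false_eq_true, false_iff]
    rintro ⟨i', h1, h2, -⟩
    omega
  | succ n ih =>
    rw [revWhile, dif_pos (by omega : 0 ≤ i)]
    by_cases hc : revChk t p i 0 = true
    · rw [if_pos hc]
      simp only [true_iff]
      exact ⟨i, by omega, le_rfl, hc⟩
    · rw [if_neg hc, ih (i - 1) (by omega)]
      constructor
      · rintro ⟨i', h1, h2, h3⟩
        exact ⟨i', h1, by omega, h3⟩
      · rintro ⟨i', h1, h2, h3⟩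
        refine ⟨i', h1, ?_, h3⟩
        rcases eq_or_lt_of_le h2 with h | h
        · exact absurd (h ▸ h3) hc
        · omega
    
lemma revOuter_iff (t p1 p2 : List Char) (i : Int) :
    revOuter t p1 p2 i = true ↔
      ∃ i' : Int, 0 ≤ i' ∧ i' ≤ i ∧ revChk t p1 i' 0 = true ∧
        revWhile t p2 (i' - (p1.length : Int)) = true := by
  induction hn : (i + 1).toNat generalizing i with
  | zero =>
    rw [revOuter, dif_neg (by omega : ¬ 0 ≤ i)]
    simp only [Bool.false_eq_true, false_iff]
    rintro ⟨i', h1, h2, -⟩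
    omega
  | succ n ih =>
    rw [revOuter, dif_pos (by omega : 0 ≤ i)]
    by_cases hc : revChk t p1 i 0 = true
    · rw [if_pos hc]
      by_cases hw : revWhile t p2 (i - (p1.length : Int)) = true
      · rw [if_pos hw]
        simp only [true_iff]
        exact ⟨i, by omega, le_rfl, hc, hw⟩
      · rw [if_neg hw, ih (i - 1) (by omega)]
        constructor
        · rintro ⟨i', h1, h2, h3, h4⟩
          exact ⟨i', h1, by omega, h3, h4⟩
        · rintro ⟨i', h1, h2, h3, h4⟩
          refine ⟨i', h1, ?_, h3, h4⟩
          rcases eq_or_lt_of_le h2 with h | h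
          · exact absurd (h ▸ h4) hw
          · omega
    · rw [if_neg hc, ih (i - 1) (by omega)]
      constructor
      · rintro ⟨i', h1, h2, h3, h4⟩
        exact ⟨i', h1, by omega, h3, h4⟩
      · rintro ⟨i', h1, h2, h3, h4⟩
        refine ⟨i', h1, ?_, h3, h4⟩
        rcases eq_or_lt_of_le h2 with h | h
        · exact absurd (h ▸ h3) hc
        · omega
lemma prefix_drop_bound {α : Type} (p t : List α) (q : Nat) (hp : 0 < p.length)
    (h : p <+: t.drop q) : q + p.length ≤ t.length := by
  have hl := h.length_le
  simp [List.length_drop] at hl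
  omega

lemma revmatch_eq (text pat1 pat2 : String) :
    revmatch text pat1 pat2 = revmatch_alt text pat1 pat2 := by
  rw [Bool.eq_iff_iff, revmatch, revOuter_iff, revmatch_alt]
  set t := text.toList
  set p1 := pat1.toList
  set p2 := pat2.toList
  by_cases hdeg : (p1.isEmpty || p2.isEmpty) = true
  · rw [if_pos hdeg]
    simp only [Bool.false_eq_true, iff_false]
    rintro ⟨i', h0, hi, hc1, hw⟩
    have hm := ((revChk_zero_iff t p1 i').mp hc1).1
    obtain ⟨i'', h0', hi', hc2⟩ := (revWhile_iff t p2 _).mp hw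
    have ho := ((revChk_zero_iff t p2 i'').mp hc2).1
    simp only [Bool.or_eq_true, List.isEmpty_iff] at hdeg
    rcases hdeg with h | h <;> simp [h] at hm ho
  · rw [if_neg hdeg]
    simp only [Bool.or_eq_true, List.isEmpty_iff, not_or] at hdeg
    have hm : 0 < p1.length := List.length_pos_of_ne_nil hdeg.1
    have ho : 0 < p2.length := List.length_pos_of_ne_nil hdeg.2
    by_cases hf : PySem.Chars.find t p2.reverse = -1
    · rw [if_pos hf]
      simp only [Bool.false_eq_true, iff_false]
      rintro ⟨i', h0, hi, hc1, hw⟩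
      obtain ⟨i'', h0', hi', hc2⟩ := (revWhile_iff t p2 _).mp hw
      obtain ⟨-, q2, hq2, hq2len, hpre2⟩ := (revChk_zero_iff t p2 i'').mp hc2
      have hIn : PySem.Chars.isIn p2.reverse t = true :=
        (PySem.Chars.exists_prefix_drop_iff_isIn _ _).mp ⟨q2, hpre2⟩
      rw [PySem.Chars.isIn_iff_infix] at hIn
      rw [PySem.Chars.find_eq_neg_one_iff] at hf
      exact hf hIn
    · rw [if_neg hf]
      have hfnn : 0 ≤ PySem.Chars.find t p2.reverse := by
        have := PySem.Chars.neg_one_le_find t p2.reverse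
        omega
      set s := PySem.Chars.find t p2.reverse with hs
      obtain ⟨hpre_s, hmin⟩ := PySem.Chars.find_spec hfnn
      rw [PySem.List.slice_from t (by simp; omega : (0:Int) ≤ s + (p2.reverse.length : Int))]
      have hN : (s + (p2.reverse.length : Int)).toNat = s.toNat + p2.length := by
        simp only [List.length_reverse]
        omega
      rw [hN]
      rw [← PySem.Chars.exists_prefix_drop_iff_isIn p1.reverse _]
      have hq2len : s.toNat + p2.length ≤ t.length := by
        have := prefix_drop_bound p2.reverse t s.toNat (by simpa using ho) hpre_s
        simpa using this
      constructor
      · rintro ⟨i', h0, hi, hc1, hw⟩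
        obtain ⟨-, q1, hq1, hq1len, hpre1⟩ := (revChk_zero_iff t p1 i').mp hc1
        obtain ⟨i'', h0', hi', hc2⟩ := (revWhile_iff t p2 _).mp hw
        obtain ⟨-, q2, hq2, hq2len2, hpre2⟩ := (revChk_zero_iff t p2 i'').mp hc2
        have hsle : s.toNat ≤ q2 := by
          by_contra hlt
          exact hmin q2 (by omega) hpre2
        have hle : s.toNat + p2.length ≤ q1 := by omega
        refine ⟨q1 - (s.toNat + p2.length), ?_⟩
        rw [List.drop_drop]
        rw [show s.toNat + p2.length + (q1 - (s.toNat + p2.length)) = q1 by omega]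
        exact hpre1
      · rintro ⟨j, hpre1⟩
        rw [List.drop_drop] at hpre1
        set q1 := s.toNat + p2.length + j with hq1def
        have hq1len : q1 + p1.length ≤ t.length := by
          have := prefix_drop_bound p1.reverse t q1 (by simpa using hm) hpre1
          simpa using this
        refine ⟨((q1 + p1.length : Nat) : Int) - 1, by omega, by omega, ?_, ?_⟩
        · rw [revChk_zero_iff]
          exact ⟨hm, q1, by push_cast; omega, hq1len, hpre1⟩
        · rw [revWhile_iff]
          refine ⟨((s.toNat + p2.length : Nat) : Int) - 1, by omega, ?_, ?_⟩
          · push_cast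
            omega
          · rw [revChk_zero_iff]
            exact ⟨ho, s.toNat, by push_cast; omega, hq2len, hpre_s⟩

-- ===== VERDICT (by name: the statement is the Claim_ definition above) =====
theorem revmatch_spec : Claim_equal_revmatch := by
  intro text pat1 pat2 _
  unfold Spec_revmatch
  exact revmatch_eq text pat1 pat2
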